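-- pv_equiv track=rewrite | github.com/tweirick/okstate_bioinformatics_command_line_programs | fasta_manipulation_programs/fasta_x_remover.py | removeerrorcharsfromfasta
-- ===== SOURCE A (Python) =====
-- MAX_CHARS_PER_LINE = 80
--
-- def format_fasta(data):
--     i=0
--     if type(data) == list:
--         data = ''.join(data)
--
--     rtn_list = list()
--     data = data.replace('\n', '')
--
--     for e in data:
--         if (i%MAX_CHARS_PER_LINE == 0 and i!=0):
--             rtn_list.append('\n')
--         rtn_list.append(e)
--         i+=1
--     rtn_list.append('\n')
--     return ''.join(rtn_list)
--
-- def removeerrorcharsfromfasta(fasta_tag,fasta_data,error_char,minimun_sequence_length):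
--     """
--     This function takes the information for one fasta entry, if no error chars are found
--     the fasta entry will be returned as it entered. If a error character is found the
--     fasta will be returned as a number of fasta entries split around the error chars.
--     """
--     out_list = list()
--
--     #if fasta_data[0] == fasta_data[0].upper():
--     #    """If True then the sequence in in upper case."""
--     #    split_data = fasta_data.split(error_char.upper())
--     #else:
--     #    """If False then the sequence in in upper case."""
--     #    split_data = fasta_data.split(error_char.lower())
--
--     split_data = fasta_data.upper().split(error_char.upper())
--
--     i=0
--     for fasta_sub_seq in split_data:
--         if len(fasta_sub_seq) >= minimun_sequence_length:
--             out_list.append(fasta_tag.strip()+"."+str(i)+"\n")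
--             out_list.append(format_fasta(fasta_sub_seq))
--             i+=1
--
--     return ''.join(out_list)
-- ===== SOURCE B (Python) =====
-- def removeerrorcharsfromfasta(fasta_tag, fasta_data, error_char, minimun_sequence_length):
--     tag = fasta_tag.strip()
--     parts = [p for p in fasta_data.upper().split(error_char.upper())
--              if len(p) >= minimun_sequence_length]
--     pieces = []
--     for i, p in enumerate(parts):
--         seq = p.replace('\n', '')
--         chunks = []
--         while seq:
--             chunks.append(seq[:80])
--             seq = seq[80:]
--         pieces.append(tag + "." + str(i) + "\n" + "\n".join(chunks) + "\n")
--     return ''.join(pieces)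
-- ===== Notes on version B (the rewrite author's own statement) =====
-- stated objective: simpler
-- what changed: The per-character modulo-counter loop of format_fasta is replaced by slicing the sequence into 80-character chunks joined with newlines, and the kept sub-sequences are selected by a filter and numbered with enumerate instead of a manual counter.
import Mathlib
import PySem

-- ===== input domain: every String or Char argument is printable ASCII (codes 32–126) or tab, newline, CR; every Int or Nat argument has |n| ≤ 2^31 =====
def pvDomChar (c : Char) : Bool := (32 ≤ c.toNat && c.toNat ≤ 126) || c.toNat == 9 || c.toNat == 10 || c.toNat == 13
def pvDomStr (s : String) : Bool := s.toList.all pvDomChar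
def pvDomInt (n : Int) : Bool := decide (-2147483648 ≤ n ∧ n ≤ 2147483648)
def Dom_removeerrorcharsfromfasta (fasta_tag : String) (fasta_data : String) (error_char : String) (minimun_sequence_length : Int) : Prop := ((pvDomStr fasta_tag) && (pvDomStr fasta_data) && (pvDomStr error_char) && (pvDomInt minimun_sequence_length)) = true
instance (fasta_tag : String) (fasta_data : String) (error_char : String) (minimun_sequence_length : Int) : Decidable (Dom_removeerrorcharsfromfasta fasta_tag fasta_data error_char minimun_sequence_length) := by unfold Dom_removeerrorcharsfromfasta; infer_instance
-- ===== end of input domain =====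

-- B replaces format_fasta's per-character modulo-counter loop by 80-character chunk slicing
-- joined with newlines, and the manual kept-part counter by filter + enumerate (objective: simpler).

-- ===== PORT A =====
-- format_fasta, as called here: the argument is always a str (the `type(data) == list`
-- branch never fires), so it is ported for string input.
def pvFormatA (data : List Char) : List Char :=
  let d := PySem.Chars.replace data ['\n'] []
  let st := d.foldl (fun (st : List Char × Int) e =>
      ((if PySem.Int.mod st.2 80 == 0 && st.2 != 0 then st.1 ++ ['\n'] else st.1) ++ [e],
        st.2 + 1)) ([], 0)
  st.1 ++ ['\n']

def removeerrorcharsfromfasta (fasta_tag : String) (fasta_data : String) (error_char : String) (minimun_sequence_length : Int) : String :=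
  match PySem.Chars.split? (PySem.Chars.upper fasta_data.toList) (PySem.Chars.upper error_char.toList) with
  | none => ""   -- Python raises ValueError here (error_char = ""); excluded by Pre_
  | some split_data =>
    let st := split_data.foldl (fun (st : List (List Char) × Int) sub =>
        if PySem.Chars.len sub ≥ minimun_sequence_length then
          (st.1 ++ [PySem.Chars.strip fasta_tag.toList ++ ['.'] ++ PySem.Int.toChars st.2 ++ ['\n'],
            pvFormatA sub], st.2 + 1)
        else st) ([], 0)
    String.ofList (PySem.Chars.join [] st.1)

-- ===== PORT B =====
-- the `while seq: chunks.append(seq[:80]); seq = seq[80:]` loop of Source B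
def pvChunks (seq : List Char) : List (List Char) :=
  if h : seq = [] then []
  else PySem.Chars.slice seq none (some 80) :: pvChunks (PySem.Chars.slice seq (some 80) none)
termination_by seq.length
decreasing_by
  rw [PySem.Chars.slice_eq_listSlice, PySem.List.slice_from seq (by norm_num : (0:Int) ≤ 80)]
  have hlen : seq.length ≠ 0 := by simpa using h
  simp only [List.length_drop]
  norm_num
  omega

def pvFormatB (p : List Char) : List Char :=
  let seq := PySem.Chars.replace p ['\n'] []
  PySem.Chars.join ['\n'] (pvChunks seq) ++ ['\n']

def removeerrorcharsfromfasta_alt (fasta_tag : String) (fasta_data : String) (error_char : String) (minimun_sequence_length : Int) : String :=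
  match PySem.Chars.split? (PySem.Chars.upper fasta_data.toList) (PySem.Chars.upper error_char.toList) with
  | none => ""   -- Python raises ValueError here (error_char = ""); excluded by Pre_
  | some ps =>
    let tag := PySem.Chars.strip fasta_tag.toList
    let parts := ps.filter (fun p => decide (PySem.Chars.len p ≥ minimun_sequence_length))
    let pieces := (PySem.List.enumerate parts 0).map
      (fun ip => tag ++ ['.'] ++ PySem.Int.toChars ip.1 ++ ['\n'] ++ pvFormatB ip.2)
    String.ofList (PySem.Chars.join [] pieces)

-- ===== PRECONDITION & SPEC =====
-- Pre_ excludes only error_char = "", where Python's str.split("") raises ValueError (in A and in B).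
def Pre_removeerrorcharsfromfasta (fasta_tag : String) (fasta_data : String) (error_char : String) (minimun_sequence_length : Int) : Prop := error_char ≠ ""
instance (fasta_tag : String) (fasta_data : String) (error_char : String) (minimun_sequence_length : Int) : Decidable (Pre_removeerrorcharsfromfasta fasta_tag fasta_data error_char minimun_sequence_length) := by unfold Pre_removeerrorcharsfromfasta; infer_instance

def pvWitness_removeerrorcharsfromfasta : String × String × String × Int := (">seq1 ", "ggXaattXc", "x", 2)

def Spec_removeerrorcharsfromfasta (fasta_tag : String) (fasta_data : String) (error_char : String) (minimun_sequence_length : Int) (out : String) : Prop := out = removeerrorcharsfromfasta_alt fasta_tag fasta_data error_char minimun_sequence_length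
instance (fasta_tag : String) (fasta_data : String) (error_char : String) (minimun_sequence_length : Int) (out : String) : Decidable (Spec_removeerrorcharsfromfasta fasta_tag fasta_data error_char minimun_sequence_length out) := by unfold Spec_removeerrorcharsfromfasta; infer_instance

-- ===== CLAIM (what is proved, stated in full; the proofs are below) =====
def Claim_equal_removeerrorcharsfromfasta : Prop := ∀ (fasta_tag : String) (fasta_data : String) (error_char : String) (minimun_sequence_length : Int), Dom_removeerrorcharsfromfasta fasta_tag fasta_data error_char minimun_sequence_length → Pre_removeerrorcharsfromfasta fasta_tag fasta_data error_char minimun_sequence_length → Spec_removeerrorcharsfromfasta fasta_tag fasta_data error_char minimun_sequence_length (removeerrorcharsfromfasta fasta_tag fasta_data error_char minimun_sequence_length)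

-- ===== LEMMAS AND PROOFS =====

-- `pvG r l`: the characters A's per-character loop still emits when `r` more characters
-- may be written before the next '\n' has to be inserted.
def pvG : Nat → List Char → List Char
  | _, [] => []
  | 0, c :: t => '\n' :: c :: pvG 79 t
  | Nat.succ r, c :: t => c :: pvG r t

-- the distance from counter value i to the next newline insertion point
def pvRem (i : Int) : Nat := if i ≤ 0 then 80 else (if i % 80 = 0 then 0 else (80 - i % 80).toNat)

theorem pvJoin_nil_eq_flatten (xs : List (List Char)) : PySem.Chars.join [] xs = xs.flatten := by
  induction xs with
  | nil => simp [PySem.Chars.join_nil]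
  | cons a xs ih =>
    cases xs with
    | nil => simp [PySem.Chars.join_singleton]
    | cons b ys => simp [PySem.Chars.join_cons_cons] at ih ⊢; simpa using ih

theorem pvFoldA_eq_pvG (l : List Char) : ∀ (acc : List Char) (i : Int), 0 ≤ i →
    (l.foldl (fun (st : List Char × Int) e =>
      ((if PySem.Int.mod st.2 80 == 0 && st.2 != 0 then st.1 ++ ['\n'] else st.1) ++ [e],
        st.2 + 1)) (acc, i)).1 = acc ++ pvG (pvRem i) l := by
  induction l with
  | nil => intro acc i _; simp [pvG]
  | cons c t ih =>
    intro acc i hi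
    have hmod : PySem.Int.mod i 80 = i % 80 := PySem.Int.mod_eq_emod_of_pos (by omega)
    simp only [List.foldl_cons]
    rw [ih _ (i + 1) (by omega)]
    by_cases hm : i % 80 = 0
    · by_cases h0 : i = 0
      · subst h0
        have hc : (PySem.Int.mod (0:Int) 80 == 0 && (0:Int) != 0) = false := by decide
        have hr : pvRem 0 = 80 := by unfold pvRem; rw [if_pos (by omega)]
        have hr1 : pvRem 1 = 79 := by unfold pvRem; rw [if_neg (by omega), if_neg (by omega)]; rfl
        rw [if_neg (fun hx => by rw [hc] at hx; exact absurd hx (by decide))]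
        simp [hr, hr1, pvG]
      · have hc : (PySem.Int.mod i 80 == 0 && i != 0) = true := by
          rw [hmod]
          simp only [Bool.and_eq_true, beq_iff_eq, bne_iff_ne]
          exact ⟨hm, h0⟩
        have hr : pvRem i = 0 := by
          unfold pvRem; rw [if_neg (by omega), if_pos hm]
        have hr1 : pvRem (i + 1) = 79 := by
          have e1 : (i + 1) % 80 = 1 := by omega
          unfold pvRem; rw [if_neg (by omega), e1, if_neg (by omega)]; rfl
        rw [if_pos hc]
        simp [hr, hr1, pvG]
    · have hb : 0 < i % 80 ∧ i % 80 < 80 := by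
        constructor <;> omega
      have hc : (PySem.Int.mod i 80 == 0 && i != 0) = false := by
        rw [hmod]
        simp only [Bool.and_eq_false_iff, beq_eq_false_iff_ne, ne_eq]
        exact Or.inl hm
      obtain ⟨r, hrr⟩ : ∃ r, (80 - i % 80).toNat = r + 1 := ⟨(79 - i % 80).toNat, by omega⟩
      have hr : pvRem i = r + 1 := by
        unfold pvRem; rw [if_neg (by omega), if_neg hm, hrr]
      have hr1 : pvRem (i + 1) = r := by
        by_cases h79 : i % 80 = 79
        · have e1 : (i + 1) % 80 = 0 := by omega
          unfold pvRem; rw [if_neg (by omega), e1, if_pos rfl]; omega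
        · have e1 : (i + 1) % 80 = i % 80 + 1 := by omega
          unfold pvRem; rw [if_neg (by omega), e1, if_neg (by omega)]; omega
      rw [if_neg (fun hx => by rw [hc] at hx; exact absurd hx (by decide))]
      simp [hr, hr1, pvG]

theorem pvG_take (l : List Char) : ∀ (r : Nat),
    pvG r l = l.take r ++ (if l.drop r = [] then [] else pvG 0 (l.drop r)) := by
  induction l with
  | nil => intro r; simp [pvG]
  | cons c t ih =>
    intro r
    cases r with
    | zero => simp
    | succ r => simp [pvG, ih r]

theorem pvG_zero (l : List Char) : pvG 0 l = if l = [] then [] else '\n' :: pvG 80 l := by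
  cases l with
  | nil => simp [pvG]
  | cons c t => rw [if_neg (by simp)]; rfl

theorem pvChunks_nil : pvChunks [] = [] := by
  rw [pvChunks.eq_def]
  rfl

theorem pvChunks_cons (l : List Char) (h : l ≠ []) :
    pvChunks l = l.take 80 :: pvChunks (l.drop 80) := by
  have h1 : PySem.Chars.slice l none (some 80) = l.take 80 := by
    rw [PySem.Chars.slice_eq_listSlice, PySem.List.slice_to l (by norm_num : (0:Int) ≤ 80),
      show (80:Int).toNat = 80 from rfl]
  have h2 : PySem.Chars.slice l (some 80) none = l.drop 80 := by
    rw [PySem.Chars.slice_eq_listSlice, PySem.List.slice_from l (by norm_num : (0:Int) ≤ 80),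
      show (80:Int).toNat = 80 from rfl]
  rw [pvChunks.eq_def, dif_neg h, h1, h2]

theorem pvG80_eq_join_pvChunks (l : List Char) :
    pvG 80 l = PySem.Chars.join ['\n'] (pvChunks l) := by
  by_cases h : l = []
  · subst h; rw [pvChunks_nil, PySem.Chars.join_nil]; rfl
  · rw [pvChunks_cons l h, pvG_take l 80, pvG_zero]
    by_cases hd : l.drop 80 = []
    · rw [hd, if_pos rfl, pvChunks_nil, PySem.Chars.join_singleton]
      simp
    · have ih := pvG80_eq_join_pvChunks (l.drop 80)
      rw [pvChunks_cons _ hd, PySem.Chars.join_cons_cons, ← pvChunks_cons _ hd, ← ih, if_neg hd]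
      simp [hd]
termination_by l.length
decreasing_by
  have hlen : 0 < l.length := List.length_pos_of_ne_nil h
  simp only [List.length_drop]
  omega

theorem pvFormatA_eq_pvFormatB (p : List Char) : pvFormatA p = pvFormatB p := by
  unfold pvFormatA pvFormatB
  simp only []
  rw [pvFoldA_eq_pvG _ [] 0 le_rfl]
  have h80 : pvRem 0 = 80 := by unfold pvRem; rw [if_pos (by omega)]
  rw [h80, pvG80_eq_join_pvChunks]
  simp

theorem pvFinal (tag : List Char) (l : List (Int × List Char)) :
    (l.flatMap (fun ip => [tag ++ ['.'] ++ PySem.Int.toChars ip.1 ++ ['\n'], pvFormatA ip.2])).flatten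
    = (l.map (fun ip => tag ++ ['.'] ++ PySem.Int.toChars ip.1 ++ ['\n'] ++ pvFormatB ip.2)).flatten := by
  induction l with
  | nil => simp
  | cons x xs ih =>
    rw [List.flatMap_cons, List.map_cons, List.flatten_append, ih, List.flatten_cons]
    simp [pvFormatA_eq_pvFormatB]

theorem pvMainFold_eq (tag : List Char) (ml : Int) (parts : List (List Char)) :
    ∀ (out : List (List Char)) (i : Int),
    (parts.foldl (fun (st : List (List Char) × Int) sub =>
        if PySem.Chars.len sub ≥ ml then
          (st.1 ++ [tag ++ ['.'] ++ PySem.Int.toChars st.2 ++ ['\n'], pvFormatA sub], st.2 + 1)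
        else st) (out, i)).1
    = out ++ (PySem.List.enumerate (parts.filter (fun p => decide (PySem.Chars.len p ≥ ml))) i).flatMap
        (fun ip => [tag ++ ['.'] ++ PySem.Int.toChars ip.1 ++ ['\n'], pvFormatA ip.2]) := by
  induction parts with
  | nil =>
    intro out i
    have he : PySem.List.enumerate (α := List Char) [] i = [] := rfl
    simp [he]
  | cons sub rest ih =>
    intro out i
    simp only [List.foldl_cons]
    by_cases hk : PySem.Chars.len sub ≥ ml
    · rw [if_pos hk, ih]
      rw [List.filter_cons, if_pos (decide_eq_true hk)]
      have he : PySem.List.enumerate (sub :: rest.filter (fun p => decide (PySem.Chars.len p ≥ ml))) i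
          = (i, sub) :: PySem.List.enumerate (rest.filter (fun p => decide (PySem.Chars.len p ≥ ml))) (i + 1) := rfl
      rw [he, List.flatMap_cons]
      simp
    · rw [if_neg hk, ih]
      rw [List.filter_cons,
        if_neg (fun hx => by rw [decide_eq_false hk] at hx; exact absurd hx (by decide))]

theorem pvSplit_some (ec : String) (h : ec ≠ "") (s : List Char) :
    PySem.Chars.split? s (PySem.Chars.upper ec.toList)
      = some (PySem.Chars.splitOn s (PySem.Chars.upper ec.toList)) := by
  have hie : (PySem.Chars.upper ec.toList).isEmpty = false := by
    simp [PySem.Chars.upper]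
    exact h
  simp [PySem.Chars.split?, hie]

-- ===== VERDICT (by name: the statement is the Claim_ definition above) =====
theorem removeerrorcharsfromfasta_spec : Claim_equal_removeerrorcharsfromfasta := by
  intro fasta_tag fasta_data error_char ml _ hpre
  unfold Spec_removeerrorcharsfromfasta removeerrorcharsfromfasta removeerrorcharsfromfasta_alt
  rw [pvSplit_some error_char hpre]
  simp only []
  rw [pvMainFold_eq]
  rw [pvJoin_nil_eq_flatten, pvJoin_nil_eq_flatten, List.nil_append, pvFinal]
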